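-- pv_equiv track=rewrite | github.com/DataPilot-R-D/nvidia-cosmos-cookoff | modules/platform/repos/cosmos-poc/scripts/run_benchmarks_v4.py | _infer_modality
-- ===== SOURCE A (Python) =====
-- def _infer_modality(content_items):
--     has_image = any(item.get("type") == "image_url" for item in content_items)
--     has_video = any(item.get("type") == "video_url" for item in content_items)
--     if has_video and not has_image:
--         return "videos"
--     if has_image and not has_video:
--         return "frames"
--     if has_image and has_video:
--         return "mixed"
--     return "text"
-- ===== SOURCE B (Python) =====
-- def _infer_modality(content_items):
--     # Single-pass state machine over the modality label itself: each item's
--     # type transitions the label; no boolean flags, no second scan.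
--     modality = "text"
--     for item in content_items:
--         t = item.get("type")
--         if t == "image_url":
--             modality = "mixed" if modality in ("videos", "mixed") else "frames"
--         elif t == "video_url":
--             modality = "mixed" if modality in ("frames", "mixed") else "videos"
--     return modality
-- ===== Notes on version B (the rewrite author's own statement) =====
-- stated objective: alternative
-- what changed: B is a single-pass state machine that transitions the modality label itself (text->frames/videos->mixed) on each item's type, instead of A's two separate any()-scans computing boolean flags combined by an if-chain.
import Mathlib
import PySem

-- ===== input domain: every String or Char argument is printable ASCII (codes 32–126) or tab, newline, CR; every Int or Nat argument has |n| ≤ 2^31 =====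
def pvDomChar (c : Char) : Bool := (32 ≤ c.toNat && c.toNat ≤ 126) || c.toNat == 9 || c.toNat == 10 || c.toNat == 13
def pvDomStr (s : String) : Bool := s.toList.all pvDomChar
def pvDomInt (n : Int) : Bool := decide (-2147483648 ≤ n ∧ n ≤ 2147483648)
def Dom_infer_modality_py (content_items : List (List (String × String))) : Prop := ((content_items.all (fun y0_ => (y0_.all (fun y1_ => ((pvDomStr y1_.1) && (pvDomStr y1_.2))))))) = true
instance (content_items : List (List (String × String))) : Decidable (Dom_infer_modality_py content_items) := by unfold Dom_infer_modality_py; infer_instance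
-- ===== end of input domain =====

-- B is a single-pass state machine that transitions the modality label itself on each
-- item's type, instead of A's two any()-scans with boolean flags; objective: alternative.

-- ===== PORT A =====
-- item.get("type"): first-match lookup in the association list (the dict convention)
def pyGetType (item : List (String × String)) : Option String :=
  (item.find? (fun kv => kv.1 == "type")).map (fun kv => kv.2)

def infer_modality_py (content_items : List (List (String × String))) : String :=
  let has_image := content_items.any (fun item => pyGetType item == some "image_url")
  let has_video := content_items.any (fun item => pyGetType item == some "video_url")
  if has_video && !has_image then "videos"
  else if has_image && !has_video then "frames"
  else if has_image && has_video then "mixed"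
  else "text"

-- ===== PORT B =====
-- one transition of B's loop body
def pvModStep (m : String) (item : List (String × String)) : String :=
  let t := pyGetType item
  if t == some "image_url" then
    (if m == "videos" || m == "mixed" then "mixed" else "frames")
  else if t == some "video_url" then
    (if m == "frames" || m == "mixed" then "mixed" else "videos")
  else m

def infer_modality_py_alt (content_items : List (List (String × String))) : String :=
  content_items.foldl pvModStep "text"

-- ===== PRECONDITION & SPEC =====
def Spec_infer_modality_py (content_items : List (List (String × String))) (out : String) : Prop := out = infer_modality_py_alt content_items
instance (content_items : List (List (String × String))) (out : String) : Decidable (Spec_infer_modality_py content_items out) := by unfold Spec_infer_modality_py; infer_instance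

-- ===== CLAIM (what is proved, stated in full; the proofs are below) =====
def Claim_equal_infer_modality_py : Prop := ∀ (content_items : List (List (String × String))), Dom_infer_modality_py content_items → Spec_infer_modality_py content_items (infer_modality_py content_items)

-- ===== LEMMAS AND PROOFS =====

-- the label B's state encodes for a pair of flags
def pvLabel (hi hv : Bool) : String :=
  match hi, hv with
  | false, false => "text"
  | true,  false => "frames"
  | false, true  => "videos"
  | true,  true  => "mixed"

theorem pvModStep_label (hi hv : Bool) (item : List (String × String)) :
    pvModStep (pvLabel hi hv) item
      = pvLabel (hi || (pyGetType item == some "image_url"))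
                (hv || (pyGetType item == some "video_url")) := by
  unfold pvModStep
  cases ht : pyGetType item with
  | none => cases hi <;> cases hv <;> rfl
  | some s =>
    by_cases h1 : s = "image_url"
    · subst h1; cases hi <;> cases hv <;> rfl
    · by_cases h2 : s = "video_url"
      · subst h2; cases hi <;> cases hv <;> rfl
      · have e1 : (s == "image_url") = false := by simp [h1]
        have e2 : (s == "video_url") = false := by simp [h2]
        simp [e1, e2]

theorem pvFoldl_label (l : List (List (String × String))) (hi hv : Bool) :
    l.foldl pvModStep (pvLabel hi hv)
      = pvLabel (hi || l.any (fun item => pyGetType item == some "image_url"))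
                (hv || l.any (fun item => pyGetType item == some "video_url")) := by
  induction l generalizing hi hv with
  | nil => simp
  | cons x xs ih =>
    simp only [List.foldl_cons, List.any_cons, pvModStep_label, ih, Bool.or_assoc]

-- ===== VERDICT (by name: the statement is the Claim_ definition above) =====
theorem infer_modality_py_spec : Claim_equal_infer_modality_py := by
  intro l _
  unfold Spec_infer_modality_py infer_modality_py infer_modality_py_alt
  have h := pvFoldl_label l false false
  simp only [Bool.false_or] at h
  rw [show ("text" : String) = pvLabel false false from rfl, h]
  cases h1 : l.any (fun item => pyGetType item == some "image_url") <;>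
    cases h2 : l.any (fun item => pyGetType item == some "video_url") <;> rfl
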